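-- pv_equiv track=rewrite | github.com/gushedaoren/hackrank | day11.py | sum_hourglass1
-- ===== SOURCE A (Python) =====
-- def sum_hourglass1(hourglass):
--     sum = 0
--     for i in range(len(hourglass)):
--         for j in range(len(hourglass)):
--             if i != 1:
--                 sum = sum + hourglass[i][j]
--             elif i == 1 and j == 1:
--                 sum = sum + hourglass[i][j]
--     return sum
-- ===== SOURCE B (Python) =====
-- def sum_hourglass1(hourglass):
--     n = len(hourglass)
--     s = sum(hourglass[i][j] for i in range(n) for j in range(n))
--     if n >= 2:
--         s -= sum(hourglass[1][j] for j in range(n)) - hourglass[1][1]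
--     return s
-- ===== Notes on version B (the rewrite author's own statement) =====
-- stated objective: alternative
-- what changed: Instead of a per-cell conditional inside nested loops, B sums the whole n-by-n index grid unconditionally and then subtracts the excluded part of row 1 (its first n elements minus the center) as a separate correction pass.
-- outside the precondition, e.g. on sum_hourglass1([[1, 2, 3], [4, 5], [6, 7, 8]]): A returns 32, B raises IndexError
import Mathlib
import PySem

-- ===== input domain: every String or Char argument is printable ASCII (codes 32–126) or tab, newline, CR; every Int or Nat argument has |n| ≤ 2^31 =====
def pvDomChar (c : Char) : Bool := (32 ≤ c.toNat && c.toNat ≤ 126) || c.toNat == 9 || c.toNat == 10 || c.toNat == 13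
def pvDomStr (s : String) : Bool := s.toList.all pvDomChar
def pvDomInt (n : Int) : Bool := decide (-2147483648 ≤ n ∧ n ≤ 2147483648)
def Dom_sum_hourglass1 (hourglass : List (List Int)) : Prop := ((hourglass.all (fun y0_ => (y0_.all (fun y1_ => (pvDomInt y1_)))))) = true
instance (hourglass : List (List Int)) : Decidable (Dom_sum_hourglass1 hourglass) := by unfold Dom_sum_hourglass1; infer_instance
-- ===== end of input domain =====

-- B sums the whole n-by-n index grid unconditionally and then subtracts the excluded
-- part of row 1 in a separate correction pass (alternative decomposition, same cost).

-- ===== PORT A =====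
def sum_hourglass1 (hourglass : List (List Int)) : Int :=
  (List.range hourglass.length).foldl (fun s i =>
    (List.range hourglass.length).foldl (fun s j =>
      if i ≠ 1 then s + ((hourglass.getD i []).getD j 0)
      else if i = 1 ∧ j = 1 then s + ((hourglass.getD i []).getD j 0)
      else s) s) 0

-- ===== PORT B =====
def sum_hourglass1_alt (hourglass : List (List Int)) : Int :=
  let n := hourglass.length
  let s := (List.range n).foldl (fun a i =>
    (List.range n).foldl (fun a j => a + ((hourglass.getD i []).getD j 0)) a) 0
  if 2 ≤ n then
    s - ((List.range n).foldl (fun a j => a + ((hourglass.getD 1 []).getD j 0)) 0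
          - (hourglass.getD 1 []).getD 1 0)
  else s

-- ===== PRECONDITION & SPEC =====
-- Pre_ requires every row (index < n) to have at least n = len(hourglass) elements, the
-- inputs on which both programs index successfully.  Besides A's IndexError inputs this
-- also excludes ragged grids whose row 1 is shorter than the grid height but still has a
-- second element: A happens to return there (it reads row 1 only at index 1) while B's
-- unconditional full-grid pass raises the same IndexError any other short row raises.
def Pre_sum_hourglass1 (hourglass : List (List Int)) : Prop :=
  ∀ i, i < hourglass.length → hourglass.length ≤ (hourglass.getD i []).length
instance (hourglass : List (List Int)) : Decidable (Pre_sum_hourglass1 hourglass) := by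
  unfold Pre_sum_hourglass1; infer_instance

def pvWitness_sum_hourglass1 : List (List Int) := [[1, 1, 1], [1, 1, 1], [1, 1, 1]]

def Spec_sum_hourglass1 (hourglass : List (List Int)) (out : Int) : Prop := out = sum_hourglass1_alt hourglass
instance (hourglass : List (List Int)) (out : Int) : Decidable (Spec_sum_hourglass1 hourglass out) := by unfold Spec_sum_hourglass1; infer_instance

-- ===== CLAIM (what is proved, stated in full; the proofs are below) =====
def Claim_equal_sum_hourglass1 : Prop := ∀ (hourglass : List (List Int)), Dom_sum_hourglass1 hourglass → Pre_sum_hourglass1 hourglass → Spec_sum_hourglass1 hourglass (sum_hourglass1 hourglass)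

-- ===== LEMMAS AND PROOFS =====

-- sum of the first n entries read by getD equals the sum of take n, when n is in range
theorem pv_sum_getD_take (row : List Int) (n : Nat) (h : n ≤ row.length) :
    ((List.range n).map (fun j => row.getD j 0)).sum = (row.take n).sum := by
  induction n with
  | zero => simp
  | succ m ih =>
    rw [List.range_succ, List.map_append, List.sum_append, ih (by omega)]
    have hm : m < row.length := by omega
    rw [List.take_add_one, List.sum_append]
    simp [List.getElem?_eq_getElem hm]

-- sum of an indicator at index 1 over range n
theorem pv_sum_ite_one (n : Nat) (c : Int) :
    ((List.range n).map (fun j => if j = 1 then c else 0)).sum = if 2 ≤ n then c else 0 := by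
  induction n with
  | zero => simp
  | succ m ih =>
    rw [List.range_succ, List.map_append, List.sum_append, ih]
    rcases Nat.lt_or_ge m 1 with h | h
    · interval_cases m
      simp
    · rcases Nat.eq_or_lt_of_le h with h1 | h1
      · simp [← h1]
      · have : m ≠ 1 := by omega
        simp [this]
        omega

-- A's value as a sum over row indices
theorem pv_A_eq_sum (hourglass : List (List Int)) (hp : Pre_sum_hourglass1 hourglass) :
    sum_hourglass1 hourglass =
      ((List.range hourglass.length).map (fun i =>
        if i ≠ 1 then ((hourglass.getD i []).take hourglass.length).sum
        else if 2 ≤ hourglass.length then (hourglass.getD 1 []).getD 1 0 else 0)).sum := by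
  unfold sum_hourglass1
  rw [PySem.List.foldl_congr_mem (g := fun s i =>
    s + (if i ≠ 1 then ((hourglass.getD i []).take hourglass.length).sum
         else if 2 ≤ hourglass.length then (hourglass.getD 1 []).getD 1 0 else 0))]
  · rw [PySem.List.foldl_add]
    simp
  · intro s i hi
    by_cases h1 : i = 1
    · subst h1
      have hb : (fun (s : Int) (j : Nat) =>
          if (1 : Nat) ≠ 1 then s + ((hourglass.getD 1 []).getD j 0)
          else if (1 : Nat) = 1 ∧ j = 1 then s + ((hourglass.getD 1 []).getD j 0) else s)
          = (fun (s : Int) (j : Nat) => s + (if j = 1 then (hourglass.getD 1 []).getD 1 0 else 0)) := by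
        funext s j
        by_cases hj : j = 1 <;> simp [hj]
      rw [hb, PySem.List.foldl_add, pv_sum_ite_one]
      simp
    · have hlen : hourglass.length ≤ (hourglass.getD i []).length :=
        hp i (List.mem_range.mp hi)
      have hb : (fun (s : Int) (j : Nat) =>
          if i ≠ 1 then s + ((hourglass.getD i []).getD j 0)
          else if i = 1 ∧ j = 1 then s + ((hourglass.getD i []).getD j 0) else s)
          = (fun (s : Int) (j : Nat) => s + ((hourglass.getD i []).getD j 0)) := by
        funext s j; simp [h1]
      rw [hb, PySem.List.foldl_add, pv_sum_getD_take _ _ hlen]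
      simp [h1]

-- B's value as the same sum
theorem pv_B_eq_sum (hourglass : List (List Int)) (hp : Pre_sum_hourglass1 hourglass) :
    sum_hourglass1_alt hourglass =
      ((List.range hourglass.length).map (fun i =>
        if i ≠ 1 then ((hourglass.getD i []).take hourglass.length).sum
        else if 2 ≤ hourglass.length then (hourglass.getD 1 []).getD 1 0 else 0)).sum := by
  simp only [sum_hourglass1_alt]
  set n := hourglass.length with hn
  -- the full-grid pass equals the sum of row-wise take-n sums
  have hfull : (List.range n).foldl (fun a i =>
      (List.range n).foldl (fun a j => a + ((hourglass.getD i []).getD j 0)) a) 0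
      = ((List.range n).map (fun i => ((hourglass.getD i []).take n).sum)).sum := by
    rw [PySem.List.foldl_congr_mem (g := fun a i => a + ((hourglass.getD i []).take n).sum)]
    · rw [PySem.List.foldl_add]; simp
    · intro a i hi
      rw [PySem.List.foldl_add, pv_sum_getD_take _ _ (hp i (List.mem_range.mp hi))]
  -- the correction pass over row 1 equals take-n sum of row 1
  have hrow1 : (List.range n).foldl (fun a j => a + ((hourglass.getD 1 []).getD j 0)) 0
      = if 2 ≤ n then ((hourglass.getD 1 []).take n).sum else
        ((List.range n).map (fun j => (hourglass.getD 1 []).getD j 0)).sum := by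
    rw [PySem.List.foldl_add]
    split_ifs with h2
    · rw [pv_sum_getD_take _ _ (hp 1 (by omega))]; ring
    · simp
  rw [hfull]
  rcases Nat.lt_or_ge n 2 with h2 | h2
  · have hn2 : ¬ 2 ≤ n := by omega
    rw [if_neg hn2]
    apply congrArg
    apply List.map_congr_left
    intro i hi
    have : i < n := List.mem_range.mp hi
    have hne : i ≠ 1 := by omega
    simp [hne]
  · rw [if_pos h2, hrow1, if_pos h2]
    -- split the mixed sum into the full sum minus row 1's take plus the center
    have hsplit : ((List.range n).map (fun i =>
        if i ≠ 1 then ((hourglass.getD i []).take n).sum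
        else if 2 ≤ n then (hourglass.getD 1 []).getD 1 0 else 0)).sum
        = ((List.range n).map (fun i => ((hourglass.getD i []).take n).sum)).sum
          + ((List.range n).map (fun i =>
              if i = 1 then (hourglass.getD 1 []).getD 1 0 - ((hourglass.getD 1 []).take n).sum
              else 0)).sum := by
      rw [← List.sum_map_add]
      apply congrArg
      apply List.map_congr_left
      intro i _
      by_cases hi : i = 1 <;> simp [hi, h2]
    rw [hsplit, pv_sum_ite_one, if_pos h2]
    ring

-- ===== VERDICT (by name: the statement is the Claim_ definition above) =====
theorem sum_hourglass1_spec : Claim_equal_sum_hourglass1 := by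
  intro hourglass _ hpre
  unfold Spec_sum_hourglass1
  rw [pv_A_eq_sum hourglass hpre, pv_B_eq_sum hourglass hpre]
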